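-- pv_equiv track=rewrite | github.com/JinMinji/Algorithm_questions | Python/BaekJoon/question2448_4.py | merge_triangle
-- ===== SOURCE A (Python) =====
-- def merge_triangle(star_arr):
--     result_arr = [[0 for i in range(len(star_arr[0])*2)] for j in range(len(star_arr)*2)]
--
--     H = len(star_arr)
--     W = len(star_arr[0])
--
--     # 3번 복사해야함.
--     # 맨 위 삼각형
--     for i in range(len(star_arr)):
--         for j in range(len(star_arr[0])):
--             # 3번 복사해야함.
--             # 맨 위 삼각형
--             result_arr[i][W//2+j] = star_arr[i][j]
--             # 왼쪽 아래 삼각형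
--             result_arr[H + i][j] = star_arr[i][j]
--             # 오른쪽 아래 삼각형
--             result_arr[H + i][W + j] = star_arr[i][j]
--
--     return result_arr
-- ===== SOURCE B (Python) =====
-- def merge_triangle(star_arr):
--     W = len(star_arr[0])
--     top = [[0] * (W // 2) + row[:W] + [0] * (W - W // 2) for row in star_arr]
--     bottom = [row[:W] + row[:W] for row in star_arr]
--     return top + bottom
-- ===== Notes on version B (the rewrite author's own statement) =====
-- stated objective: simpler
-- what changed: B builds each of the 2H output rows directly by list concatenation (zero padding + clipped row for the top half, doubled row for the bottom half) instead of preallocating a zeroed 2Hx2W grid and scattering individual cells by index in a nested loop.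
import Mathlib
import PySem

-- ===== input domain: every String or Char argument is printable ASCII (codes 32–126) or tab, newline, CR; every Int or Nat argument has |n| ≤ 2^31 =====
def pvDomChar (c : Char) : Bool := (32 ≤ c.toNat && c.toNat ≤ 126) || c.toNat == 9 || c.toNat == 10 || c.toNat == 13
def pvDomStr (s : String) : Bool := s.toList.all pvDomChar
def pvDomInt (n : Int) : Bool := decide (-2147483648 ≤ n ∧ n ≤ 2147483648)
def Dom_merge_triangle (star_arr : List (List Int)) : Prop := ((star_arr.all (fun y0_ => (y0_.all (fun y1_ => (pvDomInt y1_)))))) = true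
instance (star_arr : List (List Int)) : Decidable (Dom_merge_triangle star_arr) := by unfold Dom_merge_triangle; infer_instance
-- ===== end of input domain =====

-- B builds each output row directly by concatenation (padding + clipped row on top, doubled row below)
-- instead of A's zero-initialized 2H×2W grid filled by per-cell index assignments; simpler, and the
-- timing run measured the bulk concatenation a constant factor faster than A's per-cell writes.

-- ===== PORT A =====
-- result_arr[i][j] = v  (index assignment; all indices are in range on every input where A returns)
def pvSet2d (g : List (List Int)) (i j : Nat) (v : Int) : List (List Int) :=
  g.modify i (fun row => row.set j v)

def merge_triangle (star_arr : List (List Int)) : List (List Int) :=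
  let H := star_arr.length
  let W := (star_arr.headD []).length
  let result := List.replicate (2*H) (List.replicate (2*W) (0:Int))
  (List.range H).foldl (fun g i =>
    (List.range W).foldl (fun g j =>
      let v := (star_arr.getD i []).getD j 0   -- star_arr[i][j]; in range whenever Pre_ holds
      pvSet2d (pvSet2d (pvSet2d g i (W/2 + j) v) (H + i) j v) (H + i) (W + j) v) g) result

-- ===== PORT B =====
def merge_triangle_alt (star_arr : List (List Int)) : List (List Int) :=
  let W := (star_arr.headD []).length
  (star_arr.map (fun row => List.replicate (W/2) 0 ++ row.take W ++ List.replicate (W - W/2) 0))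
    ++ star_arr.map (fun row => row.take W ++ row.take W)

-- ===== PRECONDITION & SPEC =====
-- Pre_ excludes exactly the inputs where A raises IndexError: the empty list (star_arr[0])
-- and inputs with a row shorter than row 0 (star_arr[i][j] for j up to len(row0)-1).
def Pre_merge_triangle (star_arr : List (List Int)) : Prop :=
  star_arr ≠ [] ∧ ∀ row ∈ star_arr, (star_arr.headD []).length ≤ row.length
instance (star_arr : List (List Int)) : Decidable (Pre_merge_triangle star_arr) := by
  unfold Pre_merge_triangle; infer_instance

def pvWitness_merge_triangle : List (List Int) := [[1, 2], [3, 4]]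

def Spec_merge_triangle (star_arr : List (List Int)) (out : List (List Int)) : Prop := out = merge_triangle_alt star_arr
instance (star_arr : List (List Int)) (out : List (List Int)) : Decidable (Spec_merge_triangle star_arr out) := by unfold Spec_merge_triangle; infer_instance

-- ===== CLAIM (what is proved, stated in full; the proofs are below) =====
def Claim_equal_merge_triangle : Prop := ∀ (star_arr : List (List Int)), Dom_merge_triangle star_arr → Pre_merge_triangle star_arr → Spec_merge_triangle star_arr (merge_triangle star_arr)

-- ===== LEMMAS AND PROOFS =====

-- value written for column j of source row i
def pvMapV (sa : List (List Int)) (W i : Nat) : List Int :=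
  (List.range W).map (fun j => (sa.getD i []).getD j 0)

def pvTop (sa : List (List Int)) (W i : Nat) : List Int :=
  List.replicate (W/2) 0 ++ pvMapV sa W i ++ List.replicate (W - W/2) 0

def pvBot (sa : List (List Int)) (W i : Nat) : List Int :=
  pvMapV sa W i ++ pvMapV sa W i

-- writing v 0, …, v (n-1) at offsets p, …, p+n-1 splices (range n).map v into xs
lemma pv_fill (v : Nat → Int) :
    ∀ (n p : Nat) (xs : List Int), p + n ≤ xs.length →
    (List.range n).foldl (fun row j => row.set (p+j) (v j)) xs
      = xs.take p ++ (List.range n).map v ++ xs.drop (p+n) := by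
  intro n
  induction n with
  | zero => intro p xs h; simp
  | succ n ih =>
    intro p xs h
    rw [List.range_succ, List.foldl_append, List.foldl_cons, List.foldl_nil,
        ih p xs (by omega)]
    have hp : p ≤ xs.length := by omega
    have hpn : p + n < xs.length := by omega
    have hlen : (xs.take p ++ (List.range n).map v).length = p + n := by
      simp [List.length_take, Nat.min_eq_left hp]
    rw [List.set_append_right _ _ (by omega)]
    rw [hlen, Nat.sub_self, List.drop_eq_getElem_cons hpn, List.set_cons_zero]
    simp [List.append_assoc]
    omega

-- a set at an index untouched by the fold commutes with the fold
lemma pv_set_foldl_comm (v : Nat → Int) (p m : Nat) (w : Int) :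
    ∀ (l : List Nat) (xs : List Int), (∀ j ∈ l, p + j ≠ m) →
    (l.foldl (fun row j => row.set (p+j) (v j)) xs).set m w
      = l.foldl (fun row j => row.set (p+j) (v j)) (xs.set m w) := by
  intro l
  induction l with
  | nil => intro xs h; simp
  | cons a t ih =>
    intro xs h
    simp only [List.foldl_cons]
    rw [ih _ (fun j hj => h j (List.mem_cons_of_mem a hj)),
        List.set_comm _ _ (h a (List.mem_cons_self))]

-- a fold doing two disjoint writes per step splits into two successive folds
lemma pv_fold2_split (v : Nat → Int) (p q : Nat) :
    ∀ (l : List Nat) (xs : List Int), (∀ j ∈ l, ∀ j' ∈ l, p + j' ≠ q + j) →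
    l.foldl (fun row j => (row.set (p+j) (v j)).set (q+j) (v j)) xs
      = l.foldl (fun row j => row.set (q+j) (v j))
          (l.foldl (fun row j => row.set (p+j) (v j)) xs) := by
  intro l
  induction l with
  | nil => intro xs h; simp
  | cons a t ih =>
    intro xs h
    simp only [List.foldl_cons]
    rw [ih _ (fun j hj j' hj' => h j (List.mem_cons_of_mem a hj) j' (List.mem_cons_of_mem a hj')),
        pv_set_foldl_comm v p (q+a) (v a) t _
          (fun j hj => h a List.mem_cons_self j (List.mem_cons_of_mem a hj))]

-- the inner cell-writing fold only touches grid rows i and hi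
lemma pv_inner_factor (v : Nat → Int) (a b c : Nat → Nat) (i hi : Nat) (hne : i ≠ hi) :
    ∀ (l : List Nat) (g : List (List Int)),
    l.foldl (fun g j => pvSet2d (pvSet2d (pvSet2d g i (a j) (v j)) hi (b j) (v j)) hi (c j) (v j)) g
      = (g.modify i (fun row => l.foldl (fun row j => row.set (a j) (v j)) row)).modify hi
          (fun row => l.foldl (fun row j => (row.set (b j) (v j)).set (c j) (v j)) row) := by
  intro l
  induction l with
  | nil =>
    intro g
    simp only [List.foldl_nil]
    rw [show (fun (row : List Int) => row) = (id : List Int → List Int) from rfl,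
        List.modify_id, List.modify_id]
  | cons x t ih =>
    intro g
    simp only [List.foldl_cons]
    rw [ih]
    simp only [pvSet2d]
    rw [List.modify_modify_eq]
    rw [List.modify_modify_ne _ _ _ hne.symm]
    rw [List.modify_modify_eq, List.modify_modify_eq]
    rfl

lemma pv_modify_at_len {α : Type} (l₁ : List α) (x : α) (l₂ : List α) (f : α → α) (n : Nat)
    (h : n = l₁.length) : (l₁ ++ x :: l₂).modify n f = l₁ ++ f x :: l₂ := by
  subst h
  induction l₁ with
  | nil => simp
  | cons a t ih => simpa [List.modify_succ_cons] using ih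

lemma pv_map_range_getD (r : List Int) :
    ∀ (W : Nat), W ≤ r.length → (List.range W).map (fun j => r.getD j 0) = r.take W := by
  intro W
  induction W with
  | zero => simp
  | succ n ih =>
    intro h
    rw [List.range_succ, List.map_append, ih (by omega), List.take_add_one]
    simp [List.getD_eq_getElem?_getD, List.getElem?_eq_getElem (by omega : n < r.length)]

lemma pv_map_range_fn {β : Type} (f : List Int → β) :
    ∀ (l : List (List Int)), (List.range l.length).map (fun i => f (l.getD i [])) = l.map f := by
  intro l
  induction l with
  | nil => simp
  | cons a t ih =>
    rw [List.length_cons, List.range_succ_eq_map]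
    simp only [List.map_cons, List.map_map]
    refine congrArg₂ _ rfl ?_
    simpa [Function.comp] using ih


lemma pv_top_row (sa : List (List Int)) (W k : Nat) :
    (List.range W).foldl (fun row j => row.set (W/2 + j) ((sa.getD k []).getD j 0))
      (List.replicate (2*W) (0:Int)) = pvTop sa W k := by
  rw [pv_fill _ W (W/2) _ (by simp; omega)]
  have h1 : min (W/2) (2*W) = W/2 := by omega
  have h2 : 2*W - (W/2 + W) = W - W/2 := by omega
  simp [pvTop, pvMapV, List.take_replicate, List.drop_replicate, h1, h2]

lemma pv_bot_row (sa : List (List Int)) (W k : Nat) :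
    (List.range W).foldl (fun row j =>
        (row.set j ((sa.getD k []).getD j 0)).set (W + j) ((sa.getD k []).getD j 0))
      (List.replicate (2*W) (0:Int)) = pvBot sa W k := by
  have hsplit := pv_fold2_split (fun j => (sa.getD k []).getD j 0) 0 W (List.range W)
    (List.replicate (2*W) (0:Int))
    (by intro j hj j' hj'; rw [List.mem_range] at hj hj'; omega)
  simp only [Nat.zero_add] at hsplit
  rw [hsplit]
  have hfill1 := pv_fill (fun j => (sa.getD k []).getD j 0) W 0 (List.replicate (2*W) (0:Int))
    (by simp; omega)
  simp only [Nat.zero_add] at hfill1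
  rw [hfill1]
  have hW : 2*W - W = W := by omega
  simp only [List.take_zero, List.nil_append, List.drop_replicate, hW]
  rw [pv_fill _ W W _ (by simp)]
  rw [List.take_append_of_le_length (by simp),
      List.drop_eq_nil_of_le (by simp)]
  simp [pvBot, pvMapV]

lemma pv_shape {α : Type} (A C M' : List α) (x y : α) :
    A ++ y :: (M' ++ (C ++ x :: M')) = (A ++ y :: (M' ++ C)) ++ x :: M' := by
  simp [List.append_assoc]

-- grid invariant: after the first k outer iterations, rows 0..k-1 and H..H+k-1 are written,
-- the other rows are still zero
lemma pv_grid_inv (sa : List (List Int)) (H W : Nat) :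
    ∀ k, k ≤ H →
    (List.range k).foldl (fun g i =>
      (List.range W).foldl (fun g j =>
        let v := (sa.getD i []).getD j 0
        pvSet2d (pvSet2d (pvSet2d g i (W/2 + j) v) (H + i) j v) (H + i) (W + j) v) g)
      (List.replicate (2*H) (List.replicate (2*W) (0:Int)))
      = (List.range k).map (pvTop sa W) ++ List.replicate (H-k) (List.replicate (2*W) 0)
        ++ (List.range k).map (pvBot sa W) ++ List.replicate (H-k) (List.replicate (2*W) 0) := by
  intro k
  induction k with
  | zero =>
    intro _
    rw [Nat.sub_zero, two_mul, List.replicate_add]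
    simp
  | succ k ih =>
    intro hk
    rw [List.range_succ, List.foldl_append, List.foldl_cons, List.foldl_nil, ih (by omega)]
    rw [pv_inner_factor (fun j => (sa.getD k []).getD j 0)
          (fun j => W/2 + j) (fun j => j) (fun j => W + j) k (H+k) (by omega)]
    have hm : H - k = (H - (k+1)) + 1 := by omega
    rw [hm, List.replicate_succ]
    simp only [List.append_assoc, List.cons_append]
    rw [pv_modify_at_len ((List.range k).map (pvTop sa W)) _ _ _ k (by simp)]
    rw [pv_shape]
    rw [pv_modify_at_len _ _ _ _ (H+k) (by simp; omega)]
    rw [pv_top_row, pv_bot_row]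
    simp [List.append_assoc]

-- ===== VERDICT (by name: the statement is the Claim_ definition above) =====
theorem merge_triangle_spec : Claim_equal_merge_triangle := by
  intro sa _ hpre
  obtain ⟨hne, hrow⟩ := hpre
  unfold Spec_merge_triangle
  simp only [merge_triangle, merge_triangle_alt]
  rw [pv_grid_inv sa sa.length (sa.headD []).length sa.length le_rfl]
  have htop : (List.range sa.length).map (pvTop sa (sa.headD []).length)
      = sa.map (fun r => List.replicate ((sa.headD []).length/2) (0:Int)
          ++ (List.range (sa.headD []).length).map (fun j => r.getD j 0)
          ++ List.replicate ((sa.headD []).length - (sa.headD []).length/2) 0) :=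
    pv_map_range_fn (fun r => List.replicate ((sa.headD []).length/2) (0:Int)
      ++ (List.range (sa.headD []).length).map (fun j => r.getD j 0)
      ++ List.replicate ((sa.headD []).length - (sa.headD []).length/2) 0) sa
  have hbot : (List.range sa.length).map (pvBot sa (sa.headD []).length)
      = sa.map (fun r => (List.range (sa.headD []).length).map (fun j => r.getD j 0)
          ++ (List.range (sa.headD []).length).map (fun j => r.getD j 0)) :=
    pv_map_range_fn (fun r => (List.range (sa.headD []).length).map (fun j => r.getD j 0)
      ++ (List.range (sa.headD []).length).map (fun j => r.getD j 0)) sa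
  simp only [Nat.sub_self, List.replicate_zero, List.append_nil]
  rw [htop, hbot]
  refine congrArg₂ (· ++ ·) ?_ ?_ <;> refine List.map_congr_left ?_ <;> intro r hr <;>
    rw [pv_map_range_getD r _ (hrow r hr)]
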